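-- pv_equiv track=rewrite | github.com/binaryhong/Algorithm | 프로그래머스/lv0/120956. 옹알이 （1）/옹알이 （1）.py | solution
-- ===== SOURCE A (Python) =====
-- def solution(babbling):
--     have = "aya", "ye", "woo", "ma"
--     have_list = []
--     for i in range(len(have)):
--         have_list.append(have[i])
--     for i in range(len(have)):
--         for j in range(len(have)):
--             if i !=j:
--                 have_list.append(have[i]+have[j])
--     for i in range(len(have)):
--         for j in range(len(have)):
--             for k in range(len(have)):
--                 if i != j and j != k and i != k:
--                     have_list.append(have[i]+have[j]+have[k])
--     for i in range(len(have)):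
--         for j in range(len(have)):
--             for k in range(len(have)):
--                 for l in range(len(have)):
--                     if i != j and i != k and i != l and j != k and j != l and k != l:
--                         have_list.append(have[i]+have[j]+have[k]+have[l])
--
--     cnt = 0
--     for i in range(len(babbling)):
--         for j in range(len(have_list)):
--             if babbling[i] == have_list[j]:
--                 cnt += 1
--     return cnt
-- ===== SOURCE B (Python) =====
-- def solution(babbling):
--     words = ["aya", "ye", "woo", "ma"]
--
--     def parse(rest, avail):
--         if not rest:
--             return True
--         for w in avail:
--             if rest.startswith(w):
--                 return parse(rest[len(w):], [x for x in avail if x != w])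
--         return False
--
--     return sum(1 for s in babbling if s and parse(s, words))
-- ===== Notes on version B (the rewrite author's own statement) =====
-- stated objective: faster
-- what changed: B replaces A's enumeration of all 64 distinct-word concatenations (built with 4 nested index loops) followed by a scan of that table for every babbling with a direct left-to-right tokenizing parse of each babbling against the four words with a no-repeat check.
import Mathlib
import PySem

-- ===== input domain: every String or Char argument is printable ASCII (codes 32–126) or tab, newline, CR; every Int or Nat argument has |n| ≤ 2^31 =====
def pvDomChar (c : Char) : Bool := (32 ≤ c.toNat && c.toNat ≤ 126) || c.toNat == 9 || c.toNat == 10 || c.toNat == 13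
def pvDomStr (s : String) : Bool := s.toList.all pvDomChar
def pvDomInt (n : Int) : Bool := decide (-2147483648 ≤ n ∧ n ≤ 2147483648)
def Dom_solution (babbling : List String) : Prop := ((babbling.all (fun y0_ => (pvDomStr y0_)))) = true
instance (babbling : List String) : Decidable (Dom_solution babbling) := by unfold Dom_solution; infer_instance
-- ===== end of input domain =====

-- B replaces A's table of all 64 distinct-word concatenations scanned per babbling by a
-- direct tokenizing parse of each babbling (objective: faster by a constant factor).

-- ===== PORT A =====
-- the tuple have = ("aya","ye","woo","ma")
def haveA : List String := ["aya", "ye", "woo", "ma"]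

-- have_list as built by A's four index-loop blocks (len(have) = 4)
def haveListA : List String :=
  let hl1 := (PySem.List.pyRange 0 4 1).foldl
    (fun acc i => acc ++ [PySem.List.pyGetD haveA i ""]) ([] : List String)
  let hl2 := (PySem.List.pyRange 0 4 1).foldl (fun acc i =>
    (PySem.List.pyRange 0 4 1).foldl (fun acc j =>
      if i ≠ j then acc ++ [PySem.List.pyGetD haveA i "" ++ PySem.List.pyGetD haveA j ""] else acc) acc) hl1
  let hl3 := (PySem.List.pyRange 0 4 1).foldl (fun acc i =>
    (PySem.List.pyRange 0 4 1).foldl (fun acc j =>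
      (PySem.List.pyRange 0 4 1).foldl (fun acc k =>
        if i ≠ j ∧ j ≠ k ∧ i ≠ k then
          acc ++ [PySem.List.pyGetD haveA i "" ++ PySem.List.pyGetD haveA j "" ++ PySem.List.pyGetD haveA k ""]
        else acc) acc) acc) hl2
  (PySem.List.pyRange 0 4 1).foldl (fun acc i =>
    (PySem.List.pyRange 0 4 1).foldl (fun acc j =>
      (PySem.List.pyRange 0 4 1).foldl (fun acc k =>
        (PySem.List.pyRange 0 4 1).foldl (fun acc l =>
          if i ≠ j ∧ i ≠ k ∧ i ≠ l ∧ j ≠ k ∧ j ≠ l ∧ k ≠ l then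
            acc ++ [PySem.List.pyGetD haveA i "" ++ PySem.List.pyGetD haveA j "" ++
                    PySem.List.pyGetD haveA k "" ++ PySem.List.pyGetD haveA l ""]
          else acc) acc) acc) acc) hl3

def solution (babbling : List String) : Int :=
  (PySem.List.pyRange 0 (babbling.length : Int) 1).foldl (fun cnt i =>
    (PySem.List.pyRange 0 (haveListA.length : Int) 1).foldl (fun cnt j =>
      if PySem.List.pyGetD babbling i "" = PySem.List.pyGetD haveListA j "" then cnt + 1 else cnt)
      cnt) (0 : Int)

-- ===== PORT B =====
-- the four words, as character lists (strings are lists of characters by convention)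
def wordsB : List (List Char) := [['a','y','a'], ['y','e'], ['w','o','o'], ['m','a']]

-- Source B's parse(rest, avail): the for-loop picks the FIRST word of avail that is a prefix
-- (find?), removes its occurrences ([x for x in avail if x != w] = filter) and recurses.
-- fuel is a totality guard only (each call strictly shrinks avail, so fuel = avail.length
-- never runs out, exactly as the Python recursion terminates).
def parseB (fuel : Nat) (rest : List Char) (avail : List (List Char)) : Bool :=
  if rest = [] then true
  else
    match fuel with
    | 0 => false
    | n + 1 =>
      match avail.find? (fun w => w.isPrefixOf rest) with
      | none => false
      | some w => parseB n (rest.drop w.length) (avail.filter (fun x => x ≠ w))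

def solution_alt (babbling : List String) : Int :=
  babbling.foldl (fun cnt s =>
    if s ≠ "" ∧ parseB wordsB.length s.toList wordsB = true then cnt + 1 else cnt) (0 : Int)

-- ===== PRECONDITION & SPEC =====
def Spec_solution (babbling : List String) (out : Int) : Prop := out = solution_alt babbling
instance (babbling : List String) (out : Int) : Decidable (Spec_solution babbling out) := by unfold Spec_solution; infer_instance

-- ===== CLAIM (what is proved, stated in full; the proofs are below) =====
def Claim_equal_solution : Prop := ∀ (babbling : List String), Dom_solution babbling → Spec_solution babbling (solution babbling)

-- ===== LEMMAS AND PROOFS =====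

-- all concatenations of sequences of pairwise-distinct words drawn from avail (incl. the
-- empty one); fuel-structured so that it reduces, used with fuel ≥ avail.length
def allConcs : Nat → List (List Char) → List (List Char)
  | 0, _ => [[]]
  | n + 1, avail =>
    [] :: avail.flatMap (fun w => (allConcs n (avail.filter (fun x => x ≠ w))).map (fun u => w ++ u))

-- among the four words, at most one is a prefix of a given string (distinct first letters)
lemma prefix_unique {w₁ w₂ : List Char} (h₁ : w₁ ∈ wordsB) (h₂ : w₂ ∈ wordsB)
    {rest : List Char} (p₁ : w₁.isPrefixOf rest = true) (p₂ : w₂.isPrefixOf rest = true) :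
    w₁ = w₂ := by
  simp only [wordsB, List.mem_cons, List.not_mem_nil, or_false] at h₁ h₂
  rcases h₁ with rfl | rfl | rfl | rfl <;> rcases h₂ with rfl | rfl | rfl | rfl <;>
    first
      | rfl
      | (cases rest with
          | nil => simp [List.isPrefixOf] at p₁
          | cons c t =>
            simp only [List.isPrefixOf_iff_prefix, List.cons_prefix_cons] at p₁ p₂
            exact absurd (p₁.1.trans p₂.1.symm) (by decide))

lemma find?_eq_some_of_mem {avail : List (List Char)} (hsub : ∀ x ∈ avail, x ∈ wordsB)
    {w : List Char} (hw : w ∈ avail) {rest : List Char} (hp : w.isPrefixOf rest = true) :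
    avail.find? (fun x => x.isPrefixOf rest) = some w := by
  induction avail with
  | nil => cases hw
  | cons a l ih =>
    by_cases ha : a.isPrefixOf rest = true
    · have : a = w := prefix_unique (hsub a (by simp)) (hsub w hw) ha hp
      subst this
      simp [List.find?, ha]
    · have hwl : w ∈ l := by
        rcases List.mem_cons.mp hw with rfl | h
        · exact absurd hp ha
        · exact h
      simp only [List.find?, Bool.of_not_eq_true ha]
      exact ih (fun x hx => hsub x (List.mem_cons_of_mem a hx)) hwl

-- main characterisation: the tokenizing parse succeeds exactly on concatenations of
-- pairwise-distinct available words
lemma parseB_iff (n : Nat) :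
    ∀ avail : List (List Char), avail.length ≤ n → (∀ x ∈ avail, x ∈ wordsB) →
      ∀ rest : List Char, (parseB n rest avail = true ↔ rest ∈ allConcs n avail) := by
  induction n with
  | zero =>
    intro avail hlen _ rest
    have hav : avail = [] := List.length_eq_zero_iff.mp (Nat.le_zero.mp hlen)
    subst hav
    rw [parseB, allConcs]
    by_cases h : rest = [] <;> simp [h]
  | succ n ih =>
    intro avail hlen hsub rest
    by_cases hr : rest = []
    · subst hr
      rw [parseB, allConcs]; simp
    · rw [parseB, allConcs, if_neg hr]
      constructor
      · intro hp
        split at hp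
        · simp at hp
        · next w hfind =>
          have hwmem : w ∈ avail := List.mem_of_find?_eq_some hfind
          have hwpre : w.isPrefixOf rest = true := by have h := List.find?_some hfind; exact h
          have hflen : (avail.filter (fun x => x ≠ w)).length ≤ n := by
            have hlt : (avail.filter (fun x => x ≠ w)).length < avail.length :=
              List.length_filter_lt_length_iff_exists.mpr ⟨w, hwmem, by simp⟩
            omega
          have hfsub : ∀ x ∈ avail.filter (fun x => x ≠ w), x ∈ wordsB :=
            fun x hx => hsub x (List.mem_of_mem_filter hx)
          have hrec := (ih _ hflen hfsub (rest.drop w.length)).mp hp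
          have hconc : w ++ rest.drop w.length = rest :=
            List.prefix_iff_eq_append.mp (List.isPrefixOf_iff_prefix.mp hwpre)
          exact List.mem_cons_of_mem _ (List.mem_flatMap.mpr
            ⟨w, hwmem, List.mem_map.mpr ⟨rest.drop w.length, hrec, hconc⟩⟩)
      · intro hmem
        rcases List.mem_cons.mp hmem with hnil | hflat
        · exact absurd hnil hr
        · obtain ⟨w, hwmem, hmm⟩ := List.mem_flatMap.mp hflat
          obtain ⟨u, hu, hconc⟩ := List.mem_map.mp hmm
          subst hconc
          have hwpre : w.isPrefixOf (w ++ u) = true :=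
            List.isPrefixOf_iff_prefix.mpr (List.prefix_append w u)
          rw [find?_eq_some_of_mem hsub hwmem hwpre]
          show parseB n ((w ++ u).drop w.length) (avail.filter (fun x => x ≠ w)) = true
          have hdrop : (w ++ u).drop w.length = u := by simp
          rw [hdrop]
          have hflen : (avail.filter (fun x => x ≠ w)).length ≤ n := by
            have hlt : (avail.filter (fun x => x ≠ w)).length < avail.length :=
              List.length_filter_lt_length_iff_exists.mpr ⟨w, hwmem, by simp⟩
            omega
          exact (ih _ hflen (fun x hx => hsub x (List.mem_of_mem_filter hx)) u).mpr hu

-- the decidable facts tying A's table to allConcs, checked by kernel evaluation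
set_option maxRecDepth 100000 in
lemma haveListA_nodup : haveListA.Nodup := by decide

set_option maxRecDepth 100000 in
lemma haveListA_sub : ∀ s ∈ haveListA, s.toList ∈ allConcs wordsB.length wordsB ∧ s ≠ "" := by decide

set_option maxRecDepth 100000 in
lemma allConcs_sub : ∀ t ∈ allConcs wordsB.length wordsB, t = [] ∨ String.ofList t ∈ haveListA := by decide

lemma ne_empty_iff (s : String) : s ≠ "" ↔ s.toList ≠ [] := by
  rw [ne_eq, ne_eq, ← String.toList_inj]; simp

lemma mem_haveListA_iff (s : String) :
    s ∈ haveListA ↔ (s ≠ "" ∧ parseB wordsB.length s.toList wordsB = true) := by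
  have hpar := parseB_iff wordsB.length wordsB le_rfl (fun x hx => hx) s.toList
  constructor
  · intro h
    obtain ⟨h1, h2⟩ := haveListA_sub s h
    exact ⟨h2, hpar.mpr h1⟩
  · rintro ⟨h1, h2⟩
    rcases allConcs_sub s.toList (hpar.mp h2) with h | h
    · exact absurd h ((ne_empty_iff s).mp h1)
    · simpa using h

lemma foldl_match_count (s : String) :
    ∀ (L : List String), L.Nodup → ∀ (c : Int),
      L.foldl (fun c w => if s = w then c + 1 else c) c =
        c + (if s ∈ L then 1 else 0) := by
  intro L
  induction L with
  | nil => intro _ c; simp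
  | cons w L ih =>
    intro hnd c
    have hndL := (List.nodup_cons.mp hnd).2
    by_cases hsw : s = w
    · subst hsw
      have hnot : s ∉ L := (List.nodup_cons.mp hnd).1
      simp [List.foldl_cons, ih hndL, hnot]
    · simp [List.foldl_cons, hsw, ih hndL]

lemma inner_eq (s : String) (c : Int) :
    (PySem.List.pyRange 0 (haveListA.length : Int) 1).foldl (fun cnt j =>
        if s = PySem.List.pyGetD haveListA j "" then cnt + 1 else cnt) c =
      (if s ≠ "" ∧ parseB wordsB.length s.toList wordsB = true then c + 1 else c) := by
  rw [PySem.List.foldl_pyRange_zero_pyGetD' haveListA ""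
    (fun cnt w => if s = w then cnt + 1 else cnt) c]
  rw [foldl_match_count s haveListA haveListA_nodup c]
  rw [if_congr (mem_haveListA_iff s) rfl rfl]
  split_ifs <;> omega

-- ===== VERDICT (by name: the statement is the Claim_ definition above) =====
theorem solution_spec : Claim_equal_solution := by
  intro babbling _
  unfold Spec_solution solution solution_alt
  rw [PySem.List.foldl_pyRange_zero_pyGetD' babbling ""
    (fun cnt s =>
      (PySem.List.pyRange 0 (haveListA.length : Int) 1).foldl (fun cnt j =>
        if s = PySem.List.pyGetD haveListA j "" then cnt + 1 else cnt) cnt) 0]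
  have hfun : (fun (cnt : Int) (s : String) =>
      (PySem.List.pyRange 0 (haveListA.length : Int) 1).foldl (fun cnt j =>
        if s = PySem.List.pyGetD haveListA j "" then cnt + 1 else cnt) cnt) =
      (fun (cnt : Int) (s : String) =>
        if s ≠ "" ∧ parseB wordsB.length s.toList wordsB = true then cnt + 1 else cnt) := by
    funext c s
    exact inner_eq s c
  rw [hfun]
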